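-- pv_equiv track=rewrite | github.com/daniel-reich/ubiquitous-fiesta | zRm6YDfQHoesdc3rb_13.py | rectangles
-- ===== SOURCE A (Python) =====
-- def rectangles(step):
--   r=1
--   if step == 0:
--     return 0
--   elif step == 1:
--     return 1
--   else:
--     for i in range(2,step+1):
--       r += i
--     return r**2
-- ===== SOURCE B (Python) =====
-- def rectangles(step):
--     if step <= 1:
--         return 0 if step == 0 else 1
--     return (step * (step + 1) // 2) ** 2
-- ===== Notes on version B (the rewrite author's own statement) =====
-- stated objective: faster
-- what changed: Replaces the O(step) summation loop with the closed-form triangular number (step*(step+1)//2)**2.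
import Mathlib
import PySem

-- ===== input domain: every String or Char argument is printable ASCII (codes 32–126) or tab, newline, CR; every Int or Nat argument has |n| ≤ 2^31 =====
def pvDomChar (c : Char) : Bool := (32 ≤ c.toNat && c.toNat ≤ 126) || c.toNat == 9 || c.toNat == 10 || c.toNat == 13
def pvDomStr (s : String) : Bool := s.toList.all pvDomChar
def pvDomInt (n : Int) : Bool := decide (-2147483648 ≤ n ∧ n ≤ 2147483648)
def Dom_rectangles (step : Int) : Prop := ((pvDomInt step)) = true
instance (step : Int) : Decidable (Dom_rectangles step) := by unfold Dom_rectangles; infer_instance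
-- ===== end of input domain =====

-- B computes the same value by the closed-form triangular number instead of A's summation loop (O(1) vs O(step)).

-- ===== PORT A =====
def rectangles (step : Int) : Int :=
  if step = 0 then 0
  else if step = 1 then 1
  else ((PySem.List.pyRange 2 (step + 1) 1).foldl (fun r i => r + i) 1) ^ 2

-- ===== PORT B =====
def rectangles_alt (step : Int) : Int :=
  if step ≤ 1 then (if step = 0 then 0 else 1)
  else (PySem.Int.floordiv (step * (step + 1)) 2) ^ 2

-- ===== PRECONDITION & SPEC =====
def Spec_rectangles (step : Int) (out : Int) : Prop := out = rectangles_alt step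
instance (step : Int) (out : Int) : Decidable (Spec_rectangles step out) := by unfold Spec_rectangles; infer_instance

-- ===== CLAIM (what is proved, stated in full; the proofs are below) =====
def Claim_equal_rectangles : Prop := ∀ (step : Int), Dom_rectangles step → Spec_rectangles step (rectangles step)

-- ===== LEMMAS AND PROOFS =====

-- twice the loop's sum 1 + 2 + … + n equals n*(n+1)
theorem pv_tri (k : Nat) :
    ((PySem.List.pyRange 2 ((k : Int) + 2) 1).foldl (fun r i => r + i) 1) * 2
      = ((k : Int) + 1) * ((k : Int) + 2) := by
  induction k with
  | zero => simp [PySem.List.pyRange_one_eq_nil]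
  | succ n ih =>
      have h : ((n : Int) + 1 + 2) = ((n : Int) + 2) + 1 := by ring
      push_cast
      rw [h, PySem.List.pyRange_one_succ_right (by omega), List.foldl_append]
      simp only [List.foldl]
      push_cast at ih
      nlinarith [ih]

theorem pv_loop_closed (step : Int) (h : 2 ≤ step) :
    ((PySem.List.pyRange 2 (step + 1) 1).foldl (fun r i => r + i) 1)
      = PySem.Int.floordiv (step * (step + 1)) 2 := by
  obtain ⟨k, hk⟩ : ∃ k : Nat, step = (k : Int) + 1 := ⟨(step - 1).toNat, by omega⟩
  subst hk
  have h2 : ((k : Int) + 1) + 1 = (k : Int) + 2 := by ring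
  rw [h2]
  have ht := pv_tri k
  have hf : PySem.Int.floordiv (((k : Int) + 1) * ((k : Int) + 2)) 2
      = (PySem.List.pyRange 2 ((k : Int) + 2) 1).foldl (fun r i => r + i) 1 := by
    have : ((k : Int) + 1) * ((k : Int) + 2)
        = 2 * ((PySem.List.pyRange 2 ((k : Int) + 2) 1).foldl (fun r i => r + i) 1) := by
      nlinarith [ht]
    rw [this]
    simp [PySem.Int.floordiv, Int.mul_fdiv_cancel_left]
  exact hf.symm

-- ===== VERDICT (by name: the statement is the Claim_ definition above) =====
theorem rectangles_spec : Claim_equal_rectangles := by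
  intro step _
  unfold Spec_rectangles rectangles rectangles_alt
  by_cases h0 : step = 0
  · simp [h0]
  by_cases h1 : step = 1
  · simp [h1]
  by_cases h2 : 2 ≤ step
  · rw [pv_loop_closed step h2]
    simp [h0, h1, show ¬ step ≤ 1 by omega]
  · -- step < 0: the loop body never runs; both sides are 1
    rw [PySem.List.pyRange_one_eq_nil (by omega)]
    simp [h0, h1, show step ≤ 1 by omega]
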